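-- pv_equiv track=rewrite | github.com/peterhelfer/aleph | code/make_dataset.py | visualize_stream
-- ===== SOURCE A (Python) =====
-- def visualize_stream(stream, block_size):
--     """Map a stream (list of 0s and 1s) to a string of '-' and 'X'
--     and insert a '|' at every block_size elements"""
--     s = ""
--     for i, x in enumerate(stream):
--         if i % block_size == 0:
--             s += '|'
--         s += 'X' if x else '-'
--     s += '|'
--     return s
-- ===== SOURCE B (Python) =====
-- def visualize_stream(stream, block_size):
--     """Map a stream (list of 0s and 1s) to a string of '-' and 'X'
--     and insert a '|' at every block_size elements"""
--     s = '|'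
--     rest = stream
--     while rest:
--         block, rest = rest[:block_size], rest[block_size:]
--         s += ''.join('X' if x else '-' for x in block) + '|'
--     return s
-- ===== Notes on version B (the rewrite author's own statement) =====
-- stated objective: alternative
-- what changed: B consumes the stream chunk-by-chunk (repeatedly splitting off a block_size-long slice and rendering it with a join), instead of A's per-element loop that tests i % block_size at every index.
-- outside the precondition, e.g. on visualize_stream([1, 0], -2): A returns '|X-|', B does not finish within the time limit
import Mathlib
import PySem

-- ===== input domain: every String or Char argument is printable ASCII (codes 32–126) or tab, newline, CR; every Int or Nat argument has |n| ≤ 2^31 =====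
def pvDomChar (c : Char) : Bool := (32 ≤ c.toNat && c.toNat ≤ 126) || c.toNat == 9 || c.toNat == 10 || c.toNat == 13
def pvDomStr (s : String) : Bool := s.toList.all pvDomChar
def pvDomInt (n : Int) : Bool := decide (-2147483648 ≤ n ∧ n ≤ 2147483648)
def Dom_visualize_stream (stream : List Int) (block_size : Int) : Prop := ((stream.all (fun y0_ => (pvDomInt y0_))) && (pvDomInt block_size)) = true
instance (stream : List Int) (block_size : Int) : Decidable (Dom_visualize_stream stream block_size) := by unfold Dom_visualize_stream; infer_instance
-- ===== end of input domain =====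

-- B renders the stream chunk-by-chunk (slice off a block, join-render it) instead of A's
-- per-element enumerate loop testing i % block_size; same cost, different decomposition.

-- ===== PORT A =====
def visualize_stream (stream : List Int) (block_size : Int) : String :=
  let s := (PySem.List.enumerate stream 0).foldl
    (fun s p =>
      (if PySem.Int.mod p.1 block_size = 0 then s ++ "|" else s)
        ++ (if p.2 ≠ 0 then "X" else "-")) ""
  s ++ "|"

-- ===== PORT B =====
-- B's while-loop over (s, rest); fuel = stream.length + 1 bounds the iterations
-- (each pass with block_size ≥ 1 strictly shortens rest; Python diverges for
-- block_size ≤ 0 on a non-empty stream, which Pre_ excludes).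
def vsGo (fuel : Nat) (s : String) (rest : List Int) (block_size : Int) : String :=
  match fuel with
  | 0 => s
  | fuel + 1 =>
    if rest = [] then s
    else
      vsGo fuel
        (s ++ String.join ((PySem.List.slice rest (some 0) (some block_size)).map
            (fun x => if x ≠ 0 then "X" else "-")) ++ "|")
        (PySem.List.slice rest (some block_size) none) block_size

def visualize_stream_alt (stream : List Int) (block_size : Int) : String :=
  vsGo (stream.length + 1) "|" stream block_size

-- ===== PRECONDITION & SPEC =====
-- Pre_ excludes non-positive block_size with a non-empty stream: there A raises
-- ZeroDivisionError (block_size = 0) or returns a separator layout that is an accident of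
-- Python's mod-sign rule (block_size < 0), where B's natural chunking loop does not terminate.
def Pre_visualize_stream (stream : List Int) (block_size : Int) : Prop :=
  1 ≤ block_size ∨ stream = []
instance (stream : List Int) (block_size : Int) : Decidable (Pre_visualize_stream stream block_size) := by
  unfold Pre_visualize_stream; infer_instance

def pvWitness_visualize_stream : List Int × Int := ([1, 0, 1, 1, 0], 2)

def Spec_visualize_stream (stream : List Int) (block_size : Int) (out : String) : Prop := out = visualize_stream_alt stream block_size
instance (stream : List Int) (block_size : Int) (out : String) : Decidable (Spec_visualize_stream stream block_size out) := by unfold Spec_visualize_stream; infer_instance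

-- ===== CLAIM (what is proved, stated in full; the proofs are below) =====
def Claim_equal_visualize_stream : Prop := ∀ (stream : List Int) (block_size : Int), Dom_visualize_stream stream block_size → Pre_visualize_stream stream block_size → Spec_visualize_stream stream block_size (visualize_stream stream block_size)

-- ===== LEMMAS AND PROOFS =====

-- rendering of one element / of a block
def chS (x : Int) : String := if x ≠ 0 then "X" else "-"
def render (l : List Int) : String := String.join (l.map chS)

-- per-element contribution in A's loop
def gA (b : Int) (p : Int × Int) : String :=
  (if PySem.Int.mod p.1 b = 0 then "|" else "") ++ chS p.2

-- reference block decomposition (fuel-indexed)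
def blocksF (fuel : Nat) (l : List Int) (b : Int) : String :=
  match fuel with
  | 0 => ""
  | fuel + 1 =>
    if l = [] then ""
    else render (l.take b.toNat) ++ "|" ++ blocksF fuel (l.drop b.toNat) b

lemma join_cons (a : String) (l : List String) :
    String.join (a :: l) = a ++ String.join l := by
  simp [String.join]
  induction l generalizing a with
  | nil => simp
  | cons x xs ih => simp [List.foldl_cons, ih (a ++ x), ih x, String.append_assoc]

lemma join_append (l₁ l₂ : List String) :
    String.join (l₁ ++ l₂) = String.join l₁ ++ String.join l₂ := by
  induction l₁ with
  | nil => simp [String.join]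
  | cons x xs ih => simp [join_cons, ih, String.append_assoc]

lemma mod_add_self (a b : Int) (hb : 0 < b) :
    PySem.Int.mod (a + b) b = PySem.Int.mod a b := by
  rw [PySem.Int.mod_eq_emod_of_pos hb, PySem.Int.mod_eq_emod_of_pos hb]
  exact Int.add_emod_right a b

-- A's fold pulls the accumulator out front
lemma foldA (b : Int) (L : List (Int × Int)) (s : String) :
    L.foldl (fun s p =>
      (if PySem.Int.mod p.1 b = 0 then s ++ "|" else s)
        ++ (if p.2 ≠ 0 then "X" else "-")) s
      = s ++ String.join (L.map (gA b)) := by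
  induction L generalizing s with
  | nil => simp [String.join]
  | cons p L ih =>
      rw [List.foldl_cons, ih, List.map_cons, join_cons]
      have : (if PySem.Int.mod p.1 b = 0 then s ++ "|" else s)
          ++ (if p.2 ≠ 0 then "X" else "-") = s ++ gA b p := by
        unfold gA chS
        split_ifs <;> simp [String.append_assoc]
      rw [this, String.append_assoc]

-- within a block: no index divisible by b, so only characters are emitted
lemma blockA (b : Int) (xs : List Int) (i0 : Int)
    (h : ∀ j : Nat, j < xs.length → PySem.Int.mod (i0 + j) b ≠ 0) :
    String.join ((PySem.List.enumerate xs i0).map (gA b)) = render xs := by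
  induction xs generalizing i0 with
  | nil => simp [render]
  | cons x xs ih =>
      rw [PySem.List.enumerate_cons, List.map_cons, join_cons]
      have h0 : PySem.Int.mod i0 b ≠ 0 := by
        have := h 0 (by simp); simpa using this
      have hrec : ∀ j : Nat, j < xs.length → PySem.Int.mod (i0 + 1 + j) b ≠ 0 := by
        intro j hj
        have h1 := h (j + 1) (by simpa using Nat.succ_lt_succ hj)
        have e : i0 + 1 + (j : Int) = i0 + ((j + 1 : Nat) : Int) := by push_cast; ring
        rw [e]; exact h1
      rw [ih (i0 + 1) hrec]
      unfold gA render chS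
      simp [h0, join_cons]

-- shifting every index by b does not change A's output
lemma shiftA (b : Int) (hb : 0 < b) (xs : List Int) (i0 : Int) :
    String.join ((PySem.List.enumerate xs (i0 + b)).map (gA b))
      = String.join ((PySem.List.enumerate xs i0).map (gA b)) := by
  induction xs generalizing i0 with
  | nil => simp
  | cons x xs ih =>
      rw [PySem.List.enumerate_cons, PySem.List.enumerate_cons,
        List.map_cons, List.map_cons, join_cons, join_cons]
      have hg : gA b (i0 + b, x) = gA b (i0, x) := by
        unfold gA; rw [mod_add_self _ _ hb]
      have : i0 + b + 1 = (i0 + 1) + b := by ring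
      rw [hg, this, ih (i0 + 1)]

-- A's loop output, block-decomposed
lemma aBlocks (b : Int) (hb : 1 ≤ b) :
    ∀ (n : Nat) (xs : List Int), xs.length < n →
    String.join ((PySem.List.enumerate xs 0).map (gA b)) ++ "|" = "|" ++ blocksF n xs b := by
  intro n
  induction n with
  | zero => intro xs h; omega
  | succ n ih =>
      intro xs hlen
      by_cases hxs : xs = []
      · subst hxs; simp [blocksF, String.join]
      · have hk : 1 ≤ b.toNat := by omega
        have hx0 : 0 < xs.length := List.length_pos_of_ne_nil hxs
        have hsplit : xs = xs.take b.toNat ++ xs.drop b.toNat := (List.take_append_drop _ _).symm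
        rw [show PySem.List.enumerate xs 0
              = PySem.List.enumerate (xs.take b.toNat) 0
                ++ PySem.List.enumerate (xs.drop b.toNat) (0 + (xs.take b.toNat).length) from by
            conv_lhs => rw [hsplit]
            exact PySem.List.enumerate_append _ _ _]
        rw [List.map_append, join_append]
        -- first block
        have htake : xs.take b.toNat ≠ [] := by
          intro hc
          rcases List.take_eq_nil_iff.mp hc with h | h
          · omega
          · exact hxs h
        obtain ⟨y, ys, hys⟩ := List.exists_cons_of_ne_nil htake
        have hys_len : ys.length ≤ b.toNat - 1 := by
          have h1 : (xs.take b.toNat).length ≤ b.toNat := by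
            rw [List.length_take]; omega
          rw [hys] at h1; simp only [List.length_cons] at h1; omega
        have hno : ∀ j : Nat, j < ys.length → PySem.Int.mod ((1 : Int) + j) b ≠ 0 := by
          intro j hj
          rw [PySem.Int.mod_eq_emod_of_pos (show (0 : Int) < b by omega)]
          rw [Int.emod_eq_of_lt (by omega) (by omega)]
          omega
        have hmod0 : PySem.Int.mod 0 b = 0 := by
          rw [PySem.Int.mod_eq_emod_of_pos (show (0 : Int) < b by omega)]; simp
        have hfirst : String.join ((PySem.List.enumerate (xs.take b.toNat) 0).map (gA b))
            = "|" ++ render (xs.take b.toNat) := by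
          rw [hys, PySem.List.enumerate_cons, List.map_cons, join_cons]
          simp only [zero_add]
          rw [blockA b ys 1 hno]
          unfold gA render chS
          simp [hmod0, join_cons, String.append_assoc]
        rw [hfirst]
        -- second part: shift start back to 0
        have hshift : String.join ((PySem.List.enumerate (xs.drop b.toNat) (0 + ((xs.take b.toNat).length : Int))).map (gA b))
            = String.join ((PySem.List.enumerate (xs.drop b.toNat) 0).map (gA b)) := by
          by_cases hdrop : xs.drop b.toNat = []
          · rw [hdrop]; simp
          · have hblen : b.toNat ≤ xs.length := by
              by_contra hc
              refine hdrop ?_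
              rw [List.drop_eq_nil_iff]; omega
            have hlt : ((xs.take b.toNat).length : Int) = b := by
              rw [List.length_take]; omega
            rw [zero_add, hlt]
            have h2 := shiftA b (by omega) (xs.drop b.toNat) 0
            rw [zero_add] at h2
            exact h2
        rw [hshift]
        have hdlen : (xs.drop b.toNat).length < n := by
          rw [List.length_drop]; omega
        have ihd := ih (xs.drop b.toNat) hdlen
        have hblk : blocksF (n + 1) xs b
            = render (xs.take b.toNat) ++ "|" ++ blocksF n (xs.drop b.toNat) b := by
          simp only [blocksF, if_neg hxs]
        rw [hblk]
        simp only [String.append_assoc]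
        rw [ihd]

-- B's loop equals the block decomposition
lemma bLoop (b : Int) (hb : 1 ≤ b) :
    ∀ (n : Nat) (xs : List Int) (s : String), xs.length < n →
    vsGo n s xs b = s ++ blocksF n xs b := by
  intro n
  induction n with
  | zero => intro xs s h; omega
  | succ n ih =>
      intro xs s hlen
      by_cases hxs : xs = []
      · subst hxs; simp [vsGo, blocksF]
      · have hx0 : 0 < xs.length := List.length_pos_of_ne_nil hxs
        rw [vsGo, if_neg hxs]
        rw [PySem.List.slice_zero_start, PySem.List.slice_to _ (by omega),
          PySem.List.slice_from _ (by omega)]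
        have hdlen : (xs.drop b.toNat).length < n := by
          rw [List.length_drop]; omega
        rw [ih (xs.drop b.toNat) _ hdlen]
        have hblk : blocksF (n + 1) xs b
            = render (xs.take b.toNat) ++ "|" ++ blocksF n (xs.drop b.toNat) b := by
          simp only [blocksF, if_neg hxs]
        rw [hblk]
        unfold render chS
        simp only [String.append_assoc]

-- ===== VERDICT (by name: the statement is the Claim_ definition above) =====
theorem visualize_stream_spec : Claim_equal_visualize_stream := by
  intro stream block_size _ hpre
  unfold Spec_visualize_stream visualize_stream visualize_stream_alt
  rcases hpre with hb | hempty
  · rw [foldA, String.empty_append,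
      aBlocks block_size hb (stream.length + 1) stream (by omega),
      bLoop block_size hb (stream.length + 1) stream "|" (by omega)]
  · subst hempty
    simp [vsGo, PySem.List.enumerate]
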